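-- pv_equiv track=rewrite | github.com/wzygxr/shuati | class064_MatrixFastPowerAlgorithms/Code08_MatrixPowerSeries.py | matrix_power_series
-- ===== SOURCE A (Python) =====
-- def matrix_add(a, b, mod):
--     """矩阵加法"""
--     rows = len(a)
--     cols = len(a[0])
--     result = [[0] * cols for _ in range(rows)]
--     for i in range(rows):
--         for j in range(cols):
--             result[i][j] = (a[i][j] + b[i][j]) % mod
--     return result
--
-- def matrix_multiply(a, b, mod):
--     """矩阵乘法"""
--     rows_a, cols_a = len(a), len(a[0])
--     rows_b, cols_b = len(b), len(b[0])
--     result = [[0] * cols_b for _ in range(rows_a)]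
--     for i in range(rows_a):
--         for j in range(cols_b):
--             for k_idx in range(cols_a):
--                 result[i][j] = (result[i][j] + a[i][k_idx] * b[k_idx][j]) % mod
--     return result
--
-- def identity_matrix(size):
--     """构造单位矩阵"""
--     result = [[0] * size for _ in range(size)]
--     for i in range(size):
--         result[i][i] = 1
--     return result
--
-- def matrix_power(base, exp, mod):
--     """矩阵快速幂"""
--     size = len(base)
--     result = identity_matrix(size)
--     while exp > 0:
--         if exp & 1:
--             result = matrix_multiply(result, base, mod)
--         base = matrix_multiply(base, base, mod)
--         exp >>= 1
--     return result
--
-- def matrix_power_series(base, exp, mod):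
--     """矩阵幂级数求和 - 分治法"""
--     if exp == 1:
--         return base
--
--     if exp & 1:
--         # S(k) = S(k-1) + A^k
--         sub = matrix_power_series(base, exp - 1, mod)
--         power = matrix_power(base, exp, mod)
--         return matrix_add(sub, power, mod)
--     else:
--         # S(k) = (A^(k/2) + I) * S(k/2)
--         half = exp >> 1
--         sub = matrix_power_series(base, half, mod)
--         power = matrix_power(base, half, mod)
--         identity = identity_matrix(len(base))
--         factor = matrix_add(power, identity, mod)
--         return matrix_multiply(factor, sub, mod)
-- ===== SOURCE B (Python) =====
-- def _mul(a, b, mod):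
--     n = len(a)
--     return [[sum(a[i][k] * b[k][j] for k in range(n)) % mod for j in range(n)]
--             for i in range(n)]
--
-- def _add(a, b, mod):
--     return [[(x + y) % mod for x, y in zip(ra, rb)] for ra, rb in zip(a, b)]
--
-- def _pow_sum(a, k, mod):
--     """Return (a^k mod, (a + a^2 + ... + a^k) mod) with a single recursion."""
--     if k == 1:
--         return a, a
--     p, s = _pow_sum(a, k // 2, mod)
--     p2 = _mul(p, p, mod)
--     s2 = _add(s, _mul(p, s, mod), mod)
--     if k % 2:
--         p2 = _mul(p2, a, mod)
--         s2 = _add(s2, p2, mod)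
--     return p2, s2
--
-- def matrix_power_series(base, exp, mod):
--     return _pow_sum(base, exp, mod)[1]
-- ===== Notes on version B (the rewrite author's own statement) =====
-- stated objective: faster
-- what changed: A's divide-and-conquer recomputes a full fast matrix exponentiation (matrix_power) at every recursion level; B runs a single recursion on exp that returns the pair (A^k mod, S(k) mod), so each level costs O(1) matrix multiplications, O(n^3 log exp) total instead of A's O(n^3 log^2 exp).
-- outside the precondition, e.g. on matrix_power_series([[1], [2]], 2, 5): A returns [[2], [2]], B raises IndexError
import Mathlib
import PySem

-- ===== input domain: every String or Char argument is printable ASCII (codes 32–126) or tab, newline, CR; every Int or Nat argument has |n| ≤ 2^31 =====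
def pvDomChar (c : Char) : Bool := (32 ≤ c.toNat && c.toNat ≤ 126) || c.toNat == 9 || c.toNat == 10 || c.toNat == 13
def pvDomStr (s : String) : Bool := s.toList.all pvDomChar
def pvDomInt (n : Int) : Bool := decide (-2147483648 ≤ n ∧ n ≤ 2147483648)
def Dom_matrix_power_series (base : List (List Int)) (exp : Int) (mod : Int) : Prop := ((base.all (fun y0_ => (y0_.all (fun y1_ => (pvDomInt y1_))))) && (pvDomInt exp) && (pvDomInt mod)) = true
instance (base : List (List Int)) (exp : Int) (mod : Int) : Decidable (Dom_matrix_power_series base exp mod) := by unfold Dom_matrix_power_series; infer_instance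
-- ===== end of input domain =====

-- B replaces A's divide-and-conquer (which redoes a full fast exponentiation at every
-- recursion level) by ONE recursion that returns the pair (A^k, A+…+A^k), so each level
-- costs O(1) matrix multiplications instead of O(log k).

-- a[i][j] access on in-range indices (Python list indexing; out-of-range is excluded by Pre_)
def pvGetE (a : List (List Int)) (i j : Nat) : Int := (a.getD i []).getD j 0

-- ===== PORT A =====
def matAddA (a b : List (List Int)) (m : Int) : List (List Int) :=
  (List.range a.length).map fun i =>
    (List.range (a.headD []).length).map fun j =>
      PySem.Int.mod (pvGetE a i j + pvGetE b i j) m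

def matMulA (a b : List (List Int)) (m : Int) : List (List Int) :=
  (List.range a.length).map fun i =>
    (List.range (b.headD []).length).map fun j =>
      (List.range (a.headD []).length).foldl
        (fun acc k => PySem.Int.mod (acc + pvGetE a i k * pvGetE b k j) m) 0

def idMatA (size : Nat) : List (List Int) :=
  (List.range size).map fun i => (List.replicate size (0 : Int)).set i 1

def matPowAuxA (result bse : List (List Int)) (e m : Int) : List (List Int) :=
  if h : 0 < e then
    matPowAuxA (if PySem.Int.band e 1 = 1 then matMulA result bse m else result)
      (matMulA bse bse m) (e >>> (1 : Nat)) m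
  else result
termination_by e.toNat
decreasing_by simp only [Int.shiftRight_eq_div_pow]; omega

def matPowA (bse : List (List Int)) (e m : Int) : List (List Int) :=
  matPowAuxA (idMatA bse.length) bse e m

def matrix_power_series (base : List (List Int)) (exp : Int) (mod : Int) : List (List Int) :=
  if exp = 1 then base
  else if h : exp ≤ 0 then []  -- guard for totality: the Python recursion does not terminate for exp ≤ 0
  else if PySem.Int.band exp 1 = 1 then
    matAddA (matrix_power_series base (exp - 1) mod) (matPowA base exp mod) mod
  else
    matMulA (matAddA (matPowA base (exp >>> (1 : Nat)) mod) (idMatA base.length) mod)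
      (matrix_power_series base (exp >>> (1 : Nat)) mod) mod
termination_by exp.toNat
decreasing_by
  · omega
  · simp only [Int.shiftRight_eq_div_pow]; omega

-- ===== PORT B =====
def matMulB (a b : List (List Int)) (m : Int) : List (List Int) :=
  (List.range a.length).map fun i =>
    (List.range a.length).map fun j =>
      PySem.Int.mod (((List.range a.length).map fun k => pvGetE a i k * pvGetE b k j).sum) m

def matAddB (a b : List (List Int)) (m : Int) : List (List Int) :=
  (a.zip b).map fun rr => (rr.1.zip rr.2).map fun xy => PySem.Int.mod (xy.1 + xy.2) m

def powSumB (a : List (List Int)) (k m : Int) : List (List Int) × List (List Int) :=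
  if k = 1 then (a, a)
  else if h : k ≤ 0 then (a, a)  -- guard for totality: the Python recursion does not terminate for k ≤ 0
  else
    let ps := powSumB a (PySem.Int.floordiv k 2) m
    let p2 := matMulB ps.1 ps.1 m
    let s2 := matAddB ps.2 (matMulB ps.1 ps.2 m) m
    if PySem.Int.mod k 2 ≠ 0 then
      let p3 := matMulB p2 a m
      (p3, matAddB s2 p3 m)
    else (p2, s2)
termination_by k.toNat
decreasing_by
  rw [PySem.Int.floordiv_eq_ediv_of_pos (by omega)]; omega

def matrix_power_series_alt (base : List (List Int)) (exp : Int) (mod : Int) : List (List Int) :=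
  (powSumB base exp mod).2

-- ===== PRECONDITION & SPEC =====
-- Pre_ excludes: mod = 0 (ZeroDivisionError), exp ≤ 0 (infinite recursion), and empty or
-- non-square matrices (IndexError in the matrix helpers) — except exp = 1, where A returns
-- base unconditionally, which Pre_ admits for every base and mod.
def Pre_matrix_power_series (base : List (List Int)) (exp : Int) (mod : Int) : Prop :=
  exp = 1 ∨ (2 ≤ exp ∧ mod ≠ 0 ∧ base ≠ [] ∧ ∀ r ∈ base, r.length = base.length)
instance (base : List (List Int)) (exp : Int) (mod : Int) : Decidable (Pre_matrix_power_series base exp mod) := by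
  unfold Pre_matrix_power_series; infer_instance

def pvWitness_matrix_power_series : List (List Int) × Int × Int := ([[1, 2], [3, 4]], 3, 5)

def Spec_matrix_power_series (base : List (List Int)) (exp : Int) (mod : Int) (out : List (List Int)) : Prop := out = matrix_power_series_alt base exp mod
instance (base : List (List Int)) (exp : Int) (mod : Int) (out : List (List Int)) : Decidable (Spec_matrix_power_series base exp mod out) := by unfold Spec_matrix_power_series; infer_instance

-- ===== CLAIM (what is proved, stated in full; the proofs are below) =====
def Claim_equal_matrix_power_series : Prop := ∀ (base : List (List Int)) (exp : Int) (mod : Int), Dom_matrix_power_series base exp mod → Pre_matrix_power_series base exp mod → Spec_matrix_power_series base exp mod (matrix_power_series base exp mod)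

-- ===== LEMMAS AND PROOFS =====

-- square matrix given by an entry function
def pvOfFun (n : Nat) (f : Nat → Nat → Int) : List (List Int) :=
  (List.range n).map fun i => (List.range n).map fun j => f i j

-- "a is an n×n list whose entries have the residues of x mod m"
def pvRep (n : Nat) (m : Int) (a : List (List Int))
    (x : Matrix (Fin n) (Fin n) (ZMod m.natAbs)) : Prop :=
  a.length = n ∧ (∀ r ∈ a, r.length = n) ∧
  ∀ i j : Fin n, ((pvGetE a i j : Int) : ZMod m.natAbs) = x i j

-- "every entry of a is a fixed point of (· % m)"
def pvRed (m : Int) (a : List (List Int)) : Prop :=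
  ∀ r ∈ a, ∀ v ∈ r, PySem.Int.mod v m = v

-- Σ_{t=1}^{k} y^t
def pvSZ {n : Nat} {C : Type} [CommRing C] (y : Matrix (Fin n) (Fin n) C) (k : Nat) :
    Matrix (Fin n) (Fin n) C :=
  ∑ t ∈ Finset.range k, y ^ (t + 1)

theorem pv_cast_m_zero (m : Int) : ((m : Int) : ZMod m.natAbs) = 0 := by
  rw [ZMod.intCast_zmod_eq_zero_iff_dvd]; exact Int.natAbs_dvd.mpr dvd_rfl

theorem pv_cast_mod (m x : Int) :
    ((PySem.Int.mod x m : Int) : ZMod m.natAbs) = (x : ZMod m.natAbs) := by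
  have h := PySem.Int.floordiv_mul_add_mod x m
  have h2 : PySem.Int.mod x m = x - PySem.Int.floordiv x m * m := by linarith
  rw [h2]
  push_cast
  rw [pv_cast_m_zero m]
  ring

theorem pv_mod_eq_of_cast_eq {m x y : Int} (hm : m ≠ 0)
    (h : (x : ZMod m.natAbs) = (y : ZMod m.natAbs)) :
    PySem.Int.mod x m = PySem.Int.mod y m := by
  have hdvd : m ∣ y - x := by
    have h1 := (ZMod.intCast_eq_intCast_iff _ _ _).mp h
    exact Int.natAbs_dvd.mp (Int.ModEq.dvd h1)
  have e1 := PySem.Int.floordiv_mul_add_mod x m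
  have e2 := PySem.Int.floordiv_mul_add_mod y m
  obtain ⟨c, hc⟩ := hdvd
  have hd2 : m ∣ (PySem.Int.mod x m - PySem.Int.mod y m) := by
    refine ⟨-c - PySem.Int.floordiv x m + PySem.Int.floordiv y m, ?_⟩
    have : PySem.Int.mod x m = x - PySem.Int.floordiv x m * m := by linarith
    have : PySem.Int.mod y m = y - PySem.Int.floordiv y m * m := by linarith
    nlinarith [hc]
  have habs : (PySem.Int.mod x m - PySem.Int.mod y m).natAbs < m.natAbs := by
    rcases lt_or_gt_of_ne hm with hneg | hpos
    · have b1 := PySem.Int.mod_neg_bounds (a := x) hneg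
      have b2 := PySem.Int.mod_neg_bounds (a := y) hneg
      omega
    · have b1n := PySem.Int.mod_nonneg (a := x) hpos
      have b1l := PySem.Int.mod_lt (a := x) hpos
      have b2n := PySem.Int.mod_nonneg (a := y) hpos
      have b2l := PySem.Int.mod_lt (a := y) hpos
      omega
  have := Nat.eq_zero_of_dvd_of_lt (Int.natAbs_dvd_natAbs.mpr hd2) habs
  omega

theorem pv_mod_idem {m : Int} (hm : m ≠ 0) (x : Int) :
    PySem.Int.mod (PySem.Int.mod x m) m = PySem.Int.mod x m :=
  pv_mod_eq_of_cast_eq hm (pv_cast_mod m x)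

theorem pv_mod_inj {m x y : Int} (hm : m ≠ 0) (hx : PySem.Int.mod x m = x)
    (hy : PySem.Int.mod y m = y) (h : (x : ZMod m.natAbs) = (y : ZMod m.natAbs)) : x = y := by
  rw [← hx, ← hy]; exact pv_mod_eq_of_cast_eq hm h

theorem pvGetE_ofFun {n i j : Nat} (f : Nat → Nat → Int) (hi : i < n) (hj : j < n) :
    pvGetE (pvOfFun n f) i j = f i j := by
  have h1 : i < (pvOfFun n f).length := by simp [pvOfFun, hi]
  rw [pvGetE, List.getD_eq_getElem _ _ h1]
  have h2 : (pvOfFun n f)[i] = (List.range n).map (f i) := by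
    simp [pvOfFun]
  rw [h2]
  have h3 : j < ((List.range n).map (f i)).length := by simp [hj]
  rw [List.getD_eq_getElem _ _ h3]
  simp

theorem pvGetE_eq_getElem {a : List (List Int)} {i j : Nat} (hi : i < a.length)
    (hj : j < a[i].length) : pvGetE a i j = a[i][j] := by
  rw [pvGetE, List.getD_eq_getElem _ _ hi, List.getD_eq_getElem _ _ hj]

theorem pvRed_ofFun_mod {m : Int} (hm : m ≠ 0) (n : Nat) (g : Nat → Nat → Int) :
    pvRed m (pvOfFun n fun i j => PySem.Int.mod (g i j) m) := by
  intro r hr v hv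
  simp only [pvOfFun, List.mem_map, List.mem_range] at hr
  obtain ⟨i, -, rfl⟩ := hr
  simp only [List.mem_map, List.mem_range] at hv
  obtain ⟨j, -, rfl⟩ := hv
  exact pv_mod_idem hm _

theorem pvRep_ofFun {n : Nat} {m : Int} {x : Matrix (Fin n) (Fin n) (ZMod m.natAbs)}
    (f : Nat → Nat → Int) (h : ∀ i j : Fin n, ((f i j : Int) : ZMod m.natAbs) = x i j) :
    pvRep n m (pvOfFun n f) x := by
  refine ⟨by simp [pvOfFun], ?_, ?_⟩
  · intro r hr
    simp only [pvOfFun, List.mem_map, List.mem_range] at hr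
    obtain ⟨i, -, rfl⟩ := hr
    simp
  · intro i j
    rw [pvGetE_ofFun f i.isLt j.isLt]
    exact h i j

theorem pv_eq_of_rep_red {n : Nat} {m : Int} {a b : List (List Int)}
    {x : Matrix (Fin n) (Fin n) (ZMod m.natAbs)} (hm : m ≠ 0)
    (ha : pvRep n m a x) (hb : pvRep n m b x) (ra : pvRed m a) (rb : pvRed m b) : a = b := by
  obtain ⟨la, sa, ea⟩ := ha
  obtain ⟨lb, sb, eb⟩ := hb
  apply List.ext_getElem (by omega)
  intro i h1 h2
  have hi : i < n := by omega
  have hrowa : a[i].length = n := sa a[i] (List.getElem_mem h1)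
  have hrowb : b[i].length = n := sb b[i] (List.getElem_mem h2)
  apply List.ext_getElem (by omega)
  intro j hj1 hj2
  have hj : j < n := by omega
  have hca := ea ⟨i, hi⟩ ⟨j, hj⟩
  have hcb := eb ⟨i, hi⟩ ⟨j, hj⟩
  rw [pvGetE_eq_getElem h1 (by omega)] at hca
  rw [pvGetE_eq_getElem h2 (by omega)] at hcb
  exact pv_mod_inj hm
    (ra a[i] (List.getElem_mem h1) _ (List.getElem_mem hj1))
    (rb b[i] (List.getElem_mem h2) _ (List.getElem_mem hj2))
    (hca.trans hcb.symm)

theorem pv_headD_len {n : Nat} {a : List (List Int)} (hn : 0 < n) (ha : a.length = n)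
    (hr : ∀ r ∈ a, r.length = n) : (a.headD []).length = n := by
  cases a with
  | nil => simp at ha; omega
  | cons r t => exact hr r List.mem_cons_self

-- matAddA on represented matrices
theorem pv_addA {n : Nat} {m : Int} {a b : List (List Int)}
    {x y : Matrix (Fin n) (Fin n) (ZMod m.natAbs)} (hm : m ≠ 0) (hn : 0 < n)
    (ha : pvRep n m a x) (hb : pvRep n m b y) :
    pvRep n m (matAddA a b m) (x + y) ∧ pvRed m (matAddA a b m) := by
  have hform : matAddA a b m =
      pvOfFun n fun i j => PySem.Int.mod (pvGetE a i j + pvGetE b i j) m := by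
    rw [matAddA, pvOfFun, ha.1, pv_headD_len hn ha.1 ha.2.1]
  rw [hform]
  refine ⟨pvRep_ofFun _ ?_, pvRed_ofFun_mod hm n _⟩
  intro i j
  rw [pv_cast_mod]
  push_cast
  rw [ha.2.2 i j, hb.2.2 i j]
  simp [Matrix.add_apply]

theorem pv_mod_add_left {m s v : Int} (hm : m ≠ 0) :
    PySem.Int.mod (PySem.Int.mod s m + v) m = PySem.Int.mod (s + v) m := by
  apply pv_mod_eq_of_cast_eq hm
  push_cast
  rw [pv_cast_mod]

theorem pv_foldl_mod {m : Int} (hm : m ≠ 0) (t : Nat → Int) (N : Nat) :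
    (List.range N).foldl (fun acc k => PySem.Int.mod (acc + t k) m) 0 =
      PySem.Int.mod (∑ k ∈ Finset.range N, t k) m := by
  induction N with
  | zero =>
    simp only [List.range_zero, List.foldl_nil, Finset.range_zero, Finset.sum_empty]
    exact ((PySem.Int.mod_eq_zero_iff_dvd 0 m).mpr (dvd_zero m)).symm
  | succ N ih =>
    rw [List.range_succ, List.foldl_append, List.foldl_cons, List.foldl_nil, ih,
      pv_mod_add_left hm, Finset.sum_range_succ]

theorem pv_cast_sum_mul {n : Nat} {m : Int} {a b : List (List Int)}
    {x y : Matrix (Fin n) (Fin n) (ZMod m.natAbs)}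
    (ha : pvRep n m a x) (hb : pvRep n m b y) (i j : Fin n) :
    ((∑ k ∈ Finset.range n, pvGetE a i k * pvGetE b k j : Int) : ZMod m.natAbs) =
      (x * y) i j := by
  rw [Matrix.mul_apply,
    ← Fin.sum_univ_eq_sum_range (fun k => pvGetE a (i : Nat) k * pvGetE b k (j : Nat)) n]
  push_cast
  refine Finset.sum_congr rfl fun k _ => ?_
  rw [ha.2.2 i k, hb.2.2 k j]

theorem pv_mulA {n : Nat} {m : Int} {a b : List (List Int)}
    {x y : Matrix (Fin n) (Fin n) (ZMod m.natAbs)} (hm : m ≠ 0) (hn : 0 < n)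
    (ha : pvRep n m a x) (hb : pvRep n m b y) :
    pvRep n m (matMulA a b m) (x * y) ∧ pvRed m (matMulA a b m) := by
  have hform : matMulA a b m =
      pvOfFun n fun i j =>
        PySem.Int.mod (∑ k ∈ Finset.range n, pvGetE a i k * pvGetE b k j) m := by
    rw [matMulA, pvOfFun, ha.1, pv_headD_len hn ha.1 ha.2.1, pv_headD_len hn hb.1 hb.2.1]
    refine List.map_congr_left fun i _ => List.map_congr_left fun j _ => ?_
    exact pv_foldl_mod hm _ n
  rw [hform]
  refine ⟨pvRep_ofFun _ ?_, pvRed_ofFun_mod hm n _⟩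
  intro i j
  rw [pv_cast_mod]
  exact pv_cast_sum_mul ha hb i j

theorem pv_idA {n : Nat} {m : Int} :
    pvRep n m (idMatA n) (1 : Matrix (Fin n) (Fin n) (ZMod m.natAbs)) := by
  have hform : idMatA n = pvOfFun n fun i j => if j = i then 1 else 0 := by
    rw [idMatA, pvOfFun]
    refine List.map_congr_left fun i hi => ?_
    apply List.ext_getElem (by simp)
    intro j hj1 hj2
    simp only [List.getElem_set, List.getElem_replicate, List.getElem_map, List.getElem_range]
    split_ifs <;> omega
  rw [hform]
  apply pvRep_ofFun
  intro i j
  rw [Matrix.one_apply]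
  by_cases h : i = j
  · subst h; simp
  · have : (j : Nat) ≠ (i : Nat) := fun hc => h (Fin.ext hc.symm)
    simp [h, this]

theorem pv_sum_map_range (f : Nat → Int) (n : Nat) :
    ((List.range n).map f).sum = ∑ k ∈ Finset.range n, f k := by
  induction n with
  | zero => simp
  | succ N ih =>
    rw [List.range_succ, Finset.sum_range_succ, List.map_append, List.sum_append, ih]; simp

theorem pv_mulB {n : Nat} {m : Int} {a b : List (List Int)}
    {x y : Matrix (Fin n) (Fin n) (ZMod m.natAbs)} (hm : m ≠ 0) (hn : 0 < n)
    (ha : pvRep n m a x) (hb : pvRep n m b y) :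
    pvRep n m (matMulB a b m) (x * y) ∧ pvRed m (matMulB a b m) := by
  have hform : matMulB a b m =
      pvOfFun n fun i j =>
        PySem.Int.mod (∑ k ∈ Finset.range n, pvGetE a i k * pvGetE b k j) m := by
    rw [matMulB, pvOfFun, ha.1]
    refine List.map_congr_left fun i _ => List.map_congr_left fun j _ => ?_
    rw [pv_sum_map_range]
  rw [hform]
  refine ⟨pvRep_ofFun _ ?_, pvRed_ofFun_mod hm n _⟩
  intro i j
  rw [pv_cast_mod]
  exact pv_cast_sum_mul ha hb i j

theorem pv_addB {n : Nat} {m : Int} {a b : List (List Int)}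
    {x y : Matrix (Fin n) (Fin n) (ZMod m.natAbs)} (hm : m ≠ 0) (hn : 0 < n)
    (ha : pvRep n m a x) (hb : pvRep n m b y) :
    pvRep n m (matAddB a b m) (x + y) ∧ pvRed m (matAddB a b m) := by
  have hform : matAddB a b m =
      pvOfFun n fun i j => PySem.Int.mod (pvGetE a i j + pvGetE b i j) m := by
    rw [matAddB, pvOfFun]
    have hla : a.length = n := ha.1
    have hlb : b.length = n := hb.1
    apply List.ext_getElem (by simp [hla, hlb])
    intro i h1 h2
    have hi : i < n := by simp at h2; omega
    have hia : i < a.length := by omega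
    have hib : i < b.length := by omega
    simp only [List.getElem_map, List.getElem_zip, List.getElem_range]
    have hrowa : a[i].length = n := ha.2.1 a[i] (List.getElem_mem hia)
    have hrowb : b[i].length = n := hb.2.1 b[i] (List.getElem_mem hib)
    apply List.ext_getElem (by simp [hrowa, hrowb])
    intro j hj1 hj2
    have hj : j < n := by simp [hrowa, hrowb] at hj1; omega
    simp only [List.getElem_map, List.getElem_zip, List.getElem_range]
    rw [pvGetE_eq_getElem hia (by omega), pvGetE_eq_getElem hib (by omega)]
  rw [hform]
  refine ⟨pvRep_ofFun _ ?_, pvRed_ofFun_mod hm n _⟩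
  intro i j
  rw [pv_cast_mod]
  push_cast
  rw [ha.2.2 i j, hb.2.2 i j]
  simp [Matrix.add_apply]

theorem pvSZ_double {n : Nat} {C : Type} [CommRing C] (y : Matrix (Fin n) (Fin n) C) (h : Nat) :
    pvSZ y (2 * h) = pvSZ y h + y ^ h * pvSZ y h := by
  rw [pvSZ, two_mul, Finset.sum_range_add]
  congr 1
  rw [pvSZ, Finset.mul_sum]
  refine Finset.sum_congr rfl fun t _ => ?_
  rw [← pow_add]
  ring_nf

theorem pvSZ_succ {n : Nat} {C : Type} [CommRing C] (y : Matrix (Fin n) (Fin n) C) (h : Nat) :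
    pvSZ y (h + 1) = pvSZ y h + y ^ (h + 1) := by
  simp [pvSZ, Finset.sum_range_succ]

theorem pvSZ_one {n : Nat} {C : Type} [CommRing C] (y : Matrix (Fin n) (Fin n) C) :
    pvSZ y 1 = y := by
  simp [pvSZ]

theorem pv_powAuxA {n : Nat} {m : Int} (hm : m ≠ 0) (hn : 0 < n) (e : Int) (he : 1 ≤ e)
    (result bse : List (List Int)) (x y : Matrix (Fin n) (Fin n) (ZMod m.natAbs))
    (hr : pvRep n m result x) (hb : pvRep n m bse y) :
    pvRep n m (matPowAuxA result bse e m) (x * y ^ e.toNat) ∧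
      pvRed m (matPowAuxA result bse e m) := by
  rw [matPowAuxA, dif_pos (by omega : (0:Int) < e)]
  have hband : PySem.Int.band e 1 = PySem.Int.mod e 2 := PySem.Int.band_one e
  have hmod2 : PySem.Int.mod e 2 = e % 2 := PySem.Int.mod_eq_emod_of_pos (by norm_num)
  have hsh : e >>> (1 : Nat) = e / 2 := by simp [Int.shiftRight_eq_div_pow]
  by_cases h1 : e = 1
  · subst h1
    have hb1 : PySem.Int.band (1 : Int) 1 = 1 := by decide
    rw [if_pos hb1, show (1 : Int) >>> (1 : Nat) = 0 from by decide, matPowAuxA,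
      dif_neg (by norm_num : ¬ (0 : Int) < 0)]
    have hmul := pv_mulA hm hn hr hb
    simpa [pow_one] using hmul
  · have he2 : 2 ≤ e := by omega
    have hdiv : (e / 2).toNat = e.toNat / 2 := by omega
    have h12 : 1 ≤ e / 2 := by omega
    obtain ⟨hrep2, -⟩ := pv_mulA hm hn hb hb
    rcases (by omega : e % 2 = 0 ∨ e % 2 = 1) with hp | hp
    · rw [if_neg (by rw [hband, hmod2, hp]; norm_num), hsh]
      have IH := pv_powAuxA hm hn (e / 2) h12 result (matMulA bse bse m) x (y * y) hr hrep2
      have hmat : x * (y * y) ^ ((e / 2).toNat) = x * y ^ e.toNat := by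
        rw [hdiv, show y * y = y ^ 2 from (sq y).symm, ← pow_mul]
        congr 2
        omega
      rw [← hmat]
      exact IH
    · rw [if_pos (by rw [hband, hmod2, hp]), hsh]
      obtain ⟨hrepxy, -⟩ := pv_mulA hm hn hr hb
      have IH := pv_powAuxA hm hn (e / 2) h12 (matMulA result bse m) (matMulA bse bse m)
        (x * y) (y * y) hrepxy hrep2
      have hmat : (x * y) * (y * y) ^ ((e / 2).toNat) = x * y ^ e.toNat := by
        rw [hdiv, show y * y = y ^ 2 from (sq y).symm, ← pow_mul]
        have h2 : e.toNat = 2 * (e.toNat / 2) + 1 := by omega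
        conv_rhs => rw [h2, pow_succ']
        exact mul_assoc _ _ _
      rw [← hmat]
      exact IH
termination_by e.toNat
decreasing_by all_goals omega

theorem pv_powA {n : Nat} {m : Int} (hm : m ≠ 0) (hn : 0 < n) (e : Int) (he : 1 ≤ e)
    {bse : List (List Int)} {y : Matrix (Fin n) (Fin n) (ZMod m.natAbs)}
    (hb : pvRep n m bse y) :
    pvRep n m (matPowA bse e m) (y ^ e.toNat) ∧ pvRed m (matPowA bse e m) := by
  rw [matPowA, hb.1]
  have h := pv_powAuxA hm hn e he (idMatA n) bse 1 y pv_idA hb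
  rwa [one_mul] at h

theorem pv_seriesA {n : Nat} {m : Int} (hm : m ≠ 0) (hn : 0 < n) (exp : Int) (he : 2 ≤ exp)
    {base : List (List Int)} {y : Matrix (Fin n) (Fin n) (ZMod m.natAbs)}
    (hb : pvRep n m base y) :
    pvRep n m (matrix_power_series base exp m) (pvSZ y exp.toNat) ∧
      pvRed m (matrix_power_series base exp m) := by
  rw [matrix_power_series, if_neg (by omega : ¬ exp = 1), dif_neg (by omega : ¬ exp ≤ 0)]
  have hband : PySem.Int.band exp 1 = PySem.Int.mod exp 2 := PySem.Int.band_one exp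
  have hmod2 : PySem.Int.mod exp 2 = exp % 2 := PySem.Int.mod_eq_emod_of_pos (by norm_num)
  have hsh : exp >>> (1 : Nat) = exp / 2 := by simp [Int.shiftRight_eq_div_pow]
  rcases (by omega : exp % 2 = 0 ∨ exp % 2 = 1) with hp | hp
  · rw [if_neg (by rw [hband, hmod2, hp]; norm_num), hsh, hb.1]
    have hh1 : 1 ≤ exp / 2 := by omega
    have hsubrep : pvRep n m (matrix_power_series base (exp / 2) m)
        (pvSZ y (exp / 2).toNat) := by
      by_cases hone : exp / 2 = 1
      · have hsubeq : matrix_power_series base (exp / 2) m = base := by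
          rw [hone, matrix_power_series]; simp
        have ht1 : (exp / 2).toNat = 1 := by omega
        rw [hsubeq, ht1, pvSZ_one]
        exact hb
      · exact (pv_seriesA hm hn (exp / 2) (by omega) hb).1
    have hpow := pv_powA hm hn (exp / 2) hh1 hb
    have hfac := pv_addA hm hn hpow.1 (pv_idA (n := n) (m := m))
    obtain ⟨hres, hredr⟩ := pv_mulA hm hn hfac.1 hsubrep
    have hmat : (y ^ (exp / 2).toNat + 1) * pvSZ y (exp / 2).toNat = pvSZ y exp.toNat := by
      rw [add_mul, one_mul]
      have h2 : exp.toNat = 2 * (exp / 2).toNat := by omega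
      rw [h2, pvSZ_double, add_comm]
    rw [← hmat]
    exact ⟨hres, hredr⟩
  · rw [if_pos (by rw [hband, hmod2, hp])]
    have he3 : 3 ≤ exp := by omega
    have hsub := pv_seriesA hm hn (exp - 1) (by omega) hb
    have hpow := pv_powA hm hn exp (by omega) hb
    obtain ⟨hres, hredr⟩ := pv_addA hm hn hsub.1 hpow.1
    have hmat : pvSZ y (exp - 1).toNat + y ^ exp.toNat = pvSZ y exp.toNat := by
      have h1 : exp.toNat = (exp - 1).toNat + 1 := by omega
      rw [h1, pvSZ_succ]
    rw [← hmat]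
    exact ⟨hres, hredr⟩
termination_by exp.toNat
decreasing_by all_goals omega

theorem pv_powSumB {n : Nat} {m : Int} (hm : m ≠ 0) (hn : 0 < n) (k : Int) (hk : 2 ≤ k)
    {base : List (List Int)} {y : Matrix (Fin n) (Fin n) (ZMod m.natAbs)}
    (hb : pvRep n m base y) :
    (pvRep n m (powSumB base k m).1 (y ^ k.toNat) ∧ pvRed m (powSumB base k m).1) ∧
      (pvRep n m (powSumB base k m).2 (pvSZ y k.toNat) ∧ pvRed m (powSumB base k m).2) := by
  have hk2 : PySem.Int.floordiv k 2 = k / 2 := PySem.Int.floordiv_eq_ediv_of_pos (by norm_num)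
  have hmod2 : PySem.Int.mod k 2 = k % 2 := PySem.Int.mod_eq_emod_of_pos (by norm_num)
  have hP : pvRep n m (powSumB base (k / 2) m).1 (y ^ (k / 2).toNat) ∧
      pvRep n m (powSumB base (k / 2) m).2 (pvSZ y (k / 2).toNat) := by
    by_cases hone : k / 2 = 1
    · have hsubeq : powSumB base (k / 2) m = (base, base) := by
        rw [hone, powSumB]; simp
      have ht1 : (k / 2).toNat = 1 := by omega
      rw [hsubeq, ht1, pvSZ_one, pow_one]
      exact ⟨hb, hb⟩
    · have IH := pv_powSumB hm hn (k / 2) (by omega) hb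
      exact ⟨IH.1.1, IH.2.1⟩
  have hp2 := pv_mulB hm hn hP.1 hP.1
  have hs2 := pv_addB hm hn hP.2 (pv_mulB hm hn hP.1 hP.2).1
  have hps2 : pvRep n m
      (matAddB (powSumB base (k / 2) m).2
        (matMulB (powSumB base (k / 2) m).1 (powSumB base (k / 2) m).2 m) m)
      (pvSZ y (2 * (k / 2).toNat)) := by
    rw [pvSZ_double]
    exact hs2.1
  have hpp2 : pvRep n m
      (matMulB (powSumB base (k / 2) m).1 (powSumB base (k / 2) m).1 m)
      (y ^ (2 * (k / 2).toNat)) := by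
    have : y ^ (2 * (k / 2).toNat) = y ^ (k / 2).toNat * y ^ (k / 2).toNat := by
      rw [two_mul, pow_add]
    rw [this]
    exact hp2.1
  have hunf : powSumB base k m =
      if PySem.Int.mod k 2 ≠ 0 then
        (matMulB (matMulB (powSumB base (k / 2) m).1 (powSumB base (k / 2) m).1 m) base m,
         matAddB
           (matAddB (powSumB base (k / 2) m).2
             (matMulB (powSumB base (k / 2) m).1 (powSumB base (k / 2) m).2 m) m)
           (matMulB (matMulB (powSumB base (k / 2) m).1 (powSumB base (k / 2) m).1 m) base m)
           m)
      else
        (matMulB (powSumB base (k / 2) m).1 (powSumB base (k / 2) m).1 m,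
         matAddB (powSumB base (k / 2) m).2
           (matMulB (powSumB base (k / 2) m).1 (powSumB base (k / 2) m).2 m) m) := by
    rw [powSumB, if_neg (by omega : ¬ k = 1), dif_neg (by omega : ¬ k ≤ 0), hk2]
  rcases (by omega : k % 2 = 0 ∨ k % 2 = 1) with hp | hp
  · rw [hunf, if_neg (by rw [hmod2, hp]; norm_num)]
    have ht : k.toNat = 2 * (k / 2).toNat := by omega
    rw [ht]
    exact ⟨⟨hpp2, hp2.2⟩, ⟨hps2, hs2.2⟩⟩
  · rw [hunf, if_pos (by rw [hmod2, hp]; norm_num)]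
    have hp3 := pv_mulB hm hn hpp2 hb
    have hs3 := pv_addB hm hn hps2 hp3.1
    have ht : k.toNat = 2 * (k / 2).toNat + 1 := by omega
    rw [ht]
    constructor
    · constructor
      · have : y ^ (2 * (k / 2).toNat + 1) = y ^ (2 * (k / 2).toNat) * y := by
          rw [pow_succ]
        rw [this]
        exact hp3.1
      · exact hp3.2
    · constructor
      · have : pvSZ y (2 * (k / 2).toNat + 1) =
            pvSZ y (2 * (k / 2).toNat) + y ^ (2 * (k / 2).toNat + 1) := pvSZ_succ y _
        rw [this, show y ^ (2 * (k / 2).toNat + 1) = y ^ (2 * (k / 2).toNat) * y from pow_succ y _]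
        exact hs3.1
      · exact hs3.2
termination_by k.toNat
decreasing_by all_goals omega

-- ===== VERDICT (by name: the statement is the Claim_ definition above) =====
theorem matrix_power_series_spec : Claim_equal_matrix_power_series := by
  intro base exp mod _ hpre
  unfold Spec_matrix_power_series
  rcases hpre with h1 | ⟨he, hm, hne, hsq⟩
  · subst h1
    rw [matrix_power_series]; rw [matrix_power_series_alt, powSumB]; simp
  · have hn : 0 < base.length := by cases base <;> simp_all
    set y : Matrix (Fin base.length) (Fin base.length) (ZMod mod.natAbs) :=
      Matrix.of fun i j => ((pvGetE base i j : Int) : ZMod mod.natAbs) with hy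
    have hbase : pvRep base.length mod base y := ⟨rfl, hsq, fun i j => rfl⟩
    obtain ⟨hA, hAred⟩ := pv_seriesA hm hn exp he hbase
    obtain ⟨-, hB, hBred⟩ := pv_powSumB hm hn exp he hbase
    exact pv_eq_of_rep_red hm hA hB hAred hBred
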